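-- pv_equiv track=rewrite | github.com/gwbaik9717/Algorithm | Codetree/고대 문명 유적 탐사.py | get_relics
-- ===== SOURCE A (Python) =====
-- from collections import deque
--
-- n = 5
--
-- dy = [1, 0, -1, 0]
--
-- dx = [0, 1, 0, -1]
--
-- def get_relics(graph):
--     checked = [[0] * n for _ in range(n)]
--     relics = [[0] * n for _ in range(n)]
--
--     def bfs(start):
--
--         q = deque()
--         sy, sx = start
--
--         checked[sy][sx] = 1
--         candidates = []
--
--         q.append(start)
--         candidates.append(start)
--
--         while q:
--             cy, cx = q.popleft()
--
--             for zipped in zip(dy, dx):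
--                 ny, nx = cy + zipped[0], cx + zipped[1]
--
--                 if 0 <= ny < n and 0 <= nx < n and checked[ny][nx] == 0 and graph[ny][nx] == graph[sy][sx]:
--                     q.append((ny, nx))
--                     candidates.append((ny, nx))
--                     checked[ny][nx] = 1
--
--         if len(candidates) >= 3:
--             for candidate in candidates:
--                 relics[candidate[0]][candidate[1]] = 1
--
--     for i in range(n):
--         for j in range(n):
--             if checked[i][j] == 0:
--                 bfs((i, j))
--
--     return relics, sum([sum(row) for row in relics])
-- ===== SOURCE B (Python) =====
-- n = 5
--
-- def get_relics(graph):
--     # For each cell, compute its same-value component by bounded fixpoint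
--     # expansion (label-closure), instead of a global BFS with a shared
--     # visited matrix; a cell is marked iff its component has size >= 3.
--     def component(sy, sx):
--         comp = {(sy, sx)}
--         for _ in range(n * n):
--             nxt = set(comp)
--             for (cy, cx) in comp:
--                 for (ny, nx) in ((cy + 1, cx), (cy - 1, cx), (cy, cx + 1), (cy, cx - 1)):
--                     if 0 <= ny < n and 0 <= nx < n and graph[ny][nx] == graph[sy][sx]:
--                         nxt.add((ny, nx))
--             comp = nxt
--         return comp
--
--     big = [[1 if len(component(i, j)) >= 3 else 0 for j in range(n)] for i in range(n)]
--     return big, sum([sum(row) for row in big])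
-- ===== Notes on version B (the rewrite author's own statement) =====
-- stated objective: alternative
-- what changed: Replaces A's global BFS flood fill with a shared visited matrix and queue by an independent per-cell bounded fixpoint closure (label propagation) of the same-value 4-adjacency, marking a cell iff its own component closure has size >= 3.
import Mathlib
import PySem

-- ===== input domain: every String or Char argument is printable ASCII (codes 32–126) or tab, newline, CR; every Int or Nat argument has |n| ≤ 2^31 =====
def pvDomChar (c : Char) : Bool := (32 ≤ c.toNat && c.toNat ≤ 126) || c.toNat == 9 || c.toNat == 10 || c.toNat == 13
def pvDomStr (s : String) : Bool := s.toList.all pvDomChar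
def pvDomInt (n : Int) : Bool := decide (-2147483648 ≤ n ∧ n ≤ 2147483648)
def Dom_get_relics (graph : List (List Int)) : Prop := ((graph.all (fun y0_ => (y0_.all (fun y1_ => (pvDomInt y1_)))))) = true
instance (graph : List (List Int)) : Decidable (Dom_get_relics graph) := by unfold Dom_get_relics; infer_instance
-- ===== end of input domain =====

-- B replaces A's global BFS (with a shared `checked` matrix) by an independent
-- per-cell bounded fixpoint closure of the same-value adjacency; objective: alternative.

-- ===== PORT A =====
-- graph[y][x]; exact when y,x are in range (guaranteed by the 0<=..<n guards and Pre_)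
def pvIdx2 (m : List (List Int)) (y x : Int) : Int :=
  PySem.List.pyGetD (PySem.List.pyGetD m y []) x 0

-- m[y][x] = v; exact when y,x are in range (always 0..4 here)
def pvSet2 (m : List (List Int)) (y x v : Int) : List (List Int) :=
  PySem.List.pySetD m y (PySem.List.pySetD (PySem.List.pyGetD m y []) x v)

def pv_dy : List Int := [1, 0, -1, 0]
def pv_dx : List Int := [0, 1, 0, -1]

-- the body of `for zipped in zip(dy, dx): ...` inside the while loop;
-- state is (queue, checked, candidates)
def pvBfsStep (graph : List (List Int)) (sy sx cy cx : Int)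
    (st : List (Int × Int) × List (List Int) × List (Int × Int)) (zipped : Int × Int) :
    List (Int × Int) × List (List Int) × List (Int × Int) :=
  let ny := cy + zipped.1
  let nx := cx + zipped.2
  if 0 ≤ ny ∧ ny < 5 ∧ 0 ≤ nx ∧ nx < 5 ∧ pvIdx2 st.2.1 ny nx = 0 ∧
      pvIdx2 graph ny nx = pvIdx2 graph sy sx then
    (st.1 ++ [(ny, nx)], pvSet2 st.2.1 ny nx 1, st.2.2 ++ [(ny, nx)])
  else st

def pvBfsInner (graph : List (List Int)) (sy sx cy cx : Int)
    (st : List (Int × Int) × List (List Int) × List (Int × Int)) :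
    List (Int × Int) × List (List Int) × List (Int × Int) :=
  (pv_dy.zip pv_dx).foldl (pvBfsStep graph sy sx cy cx) st

-- `while q:` — fuel-bounded transcription of the while loop (the fuel only makes
-- the recursion structural; 51 is proved sufficient below, so the 0-case is never reached)
def pvBfsLoop (graph : List (List Int)) (sy sx : Int) :
    Nat → List (Int × Int) → List (List Int) → List (Int × Int) →
    List (List Int) × List (Int × Int)
  | 0, _, checked, cand => (checked, cand)
  | fuel + 1, q, checked, cand =>
    match q with
    | [] => (checked, cand)
    | c :: q' =>
      let st := pvBfsInner graph sy sx c.1 c.2 (q', checked, cand)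
      pvBfsLoop graph sy sx fuel st.1 st.2.1 st.2.2

-- `def bfs(start): ...` : returns the updated (checked, relics)
def pvBfs (graph : List (List Int)) (start : Int × Int)
    (checked relics : List (List Int)) : List (List Int) × List (List Int) :=
  let checked1 := pvSet2 checked start.1 start.2 1
  let res := pvBfsLoop graph start.1 start.2 51 [start] checked1 [start]
  if 3 ≤ res.2.length then
    (res.1, res.2.foldl (fun r c => pvSet2 r c.1 c.2 1) relics)
  else (res.1, relics)

-- `if checked[i][j] == 0: bfs((i, j))` — the body of the outer double loop
def pvOuterStep (graph : List (List Int)) (st : List (List Int) × List (List Int))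
    (p : Int × Int) : List (List Int) × List (List Int) :=
  if pvIdx2 st.1 p.1 p.2 = 0 then pvBfs graph p st.1 st.2 else st

def get_relics (graph : List (List Int)) : List (List Int) × Int :=
  let checked0 : List (List Int) := List.replicate 5 (List.replicate 5 0)
  let relics0 : List (List Int) := List.replicate 5 (List.replicate 5 0)
  let st := (PySem.List.pyRange 0 5 1).foldl (fun st i =>
    (PySem.List.pyRange 0 5 1).foldl
      (fun st j => pvOuterStep graph st (i, j)) st)
    (checked0, relics0)
  (st.2, (st.2.map (fun row => row.sum)).sum)

-- ===== PORT B =====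
def pvNbrs (cy cx : Int) : List (Int × Int) :=
  [(cy + 1, cx), (cy - 1, cx), (cy, cx + 1), (cy, cx - 1)]

-- one pass of `for (cy,cx) in comp: for (ny,nx) in ...: nxt.add(...)` starting from nxt = set(comp)
def pvExpand (graph : List (List Int)) (sy sx : Int)
    (comp : PySem.Set (Int × Int)) : PySem.Set (Int × Int) :=
  comp.foldl (fun nxt c =>
    (pvNbrs c.1 c.2).foldl (fun nxt q =>
      if 0 ≤ q.1 ∧ q.1 < 5 ∧ 0 ≤ q.2 ∧ q.2 < 5 ∧
          pvIdx2 graph q.1 q.2 = pvIdx2 graph sy sx then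
        PySem.Set.add nxt q
      else nxt) nxt) comp

def pvComponent (graph : List (List Int)) (sy sx : Int) : PySem.Set (Int × Int) :=
  (List.range (5 * 5)).foldl (fun comp _ => pvExpand graph sy sx comp)
    (PySem.Set.add PySem.Set.empty (sy, sx))

-- `1 if len(component(i, j)) >= 3 else 0`
def pvCell (graph : List (List Int)) (i j : Int) : Int :=
  if 3 ≤ (pvComponent graph i j).length then 1 else 0

def get_relics_alt (graph : List (List Int)) : List (List Int) × Int :=
  let big := (PySem.List.pyRange 0 5 1).map (fun i =>
    (PySem.List.pyRange 0 5 1).map (fun j => pvCell graph i j))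
  (big, (big.map (fun row => row.sum)).sum)

-- ===== PRECONDITION & SPEC =====
-- Pre_ excludes exactly the inputs where the Python A raises IndexError:
-- both programs read graph[y][x] for all y,x in 0..4, so the first five rows must exist and have length ≥ 5.
def Pre_get_relics (graph : List (List Int)) : Prop :=
  5 ≤ graph.length ∧ ∀ row ∈ graph.take 5, 5 ≤ row.length
instance (graph : List (List Int)) : Decidable (Pre_get_relics graph) := by
  unfold Pre_get_relics; infer_instance

def pvWitness_get_relics : List (List Int) :=
  [[1, 1, 2, 2, 3], [1, 0, 2, 0, 3], [0, 0, 0, 4, 3], [5, 5, 4, 4, 6], [5, 5, 7, 6, 6]]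

def Spec_get_relics (graph : List (List Int)) (out : List (List Int) × Int) : Prop := out = get_relics_alt graph
instance (graph : List (List Int)) (out : List (List Int) × Int) : Decidable (Spec_get_relics graph out) := by unfold Spec_get_relics; infer_instance

-- ===== CLAIM (what is proved, stated in full; the proofs are below) =====
def Claim_equal_get_relics : Prop := ∀ (graph : List (List Int)), Dom_get_relics graph → Pre_get_relics graph → Spec_get_relics graph (get_relics graph)

-- ===== LEMMAS AND PROOFS =====

-- ---- basic geometry ----
def pvInG (p : Int × Int) : Bool := decide (0 ≤ p.1 ∧ p.1 < 5 ∧ 0 ≤ p.2 ∧ p.2 < 5)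

def pvGrid : Finset (Int × Int) :=
  (((List.range 5) ×ˢ (List.range 5)).map (fun p => ((p.1 : Int), (p.2 : Int)))).toFinset

lemma mem_pvGrid (p : Int × Int) : p ∈ pvGrid ↔ pvInG p = true := by
  rcases p with ⟨a, b⟩
  simp [pvGrid, pvInG, List.mem_product, Prod.ext_iff]
  constructor
  · rintro ⟨i, j, ⟨hi, hj⟩, rfl, rfl⟩; omega
  · rintro ⟨h1, h2, h3, h4⟩
    exact ⟨a.toNat, b.toNat, ⟨by omega, by omega⟩, by omega, by omega⟩

lemma card_pvGrid : pvGrid.card = 25 := by decide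

lemma pvNbrs_symm {c q : Int × Int} (h : q ∈ pvNbrs c.1 c.2) : c ∈ pvNbrs q.1 q.2 := by
  simp [pvNbrs, Prod.ext_iff] at h ⊢
  rcases c with ⟨a, b⟩; rcases q with ⟨x, y⟩
  simp_all; omega

lemma pvNbrs_iff_offset {c q : Int × Int} :
    q ∈ pvNbrs c.1 c.2 ↔ ∃ o ∈ pv_dy.zip pv_dx, q = (c.1 + o.1, c.2 + o.2) := by
  simp [pvNbrs, pv_dy, pv_dx, Prod.ext_iff]
  rcases c with ⟨a, b⟩; rcases q with ⟨x, y⟩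
  constructor
  · rintro (h | h | h | h) <;> simp_all <;> omega
  · rintro (h | h | h | h) <;> simp_all <;> omega

-- ---- the same-value reachability relation both programs compute ----
inductive pvReach (g : List (List Int)) (s : Int × Int) : Int × Int → Prop
  | base : pvReach g s s
  | step {c q : Int × Int} : pvReach g s c → q ∈ pvNbrs c.1 c.2 → pvInG q = true →
      pvIdx2 g q.1 q.2 = pvIdx2 g s.1 s.2 → pvReach g s q

lemma pvReach_val {g : List (List Int)} {s c : Int × Int} (h : pvReach g s c) :
    pvIdx2 g c.1 c.2 = pvIdx2 g s.1 s.2 := by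
  induction h with
  | base => rfl
  | step _ _ _ hv _ => exact hv

lemma pvReach_inG {g : List (List Int)} {s c : Int × Int} (h : pvReach g s c)
    (hs : pvInG s = true) : pvInG c = true := by
  induction h with
  | base => exact hs
  | step _ _ hg _ _ => exact hg

lemma pvReach_trans {g : List (List Int)} {s c d : Int × Int}
    (h1 : pvReach g s c) (h2 : pvReach g c d) : pvReach g s d := by
  have hv : pvIdx2 g c.1 c.2 = pvIdx2 g s.1 s.2 := pvReach_val h1
  induction h2 with
  | base => exact h1
  | step _ hn hg hval ih => exact pvReach.step ih hn hg (hval.trans hv)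

lemma pvReach_symm {g : List (List Int)} {s c : Int × Int} (hs : pvInG s = true)
    (h : pvReach g s c) : pvReach g c s := by
  induction h with
  | base => exact pvReach.base
  | step hsc hn hg hval ih =>
    rename_i c' q
    have hc' : pvInG c' = true := pvReach_inG hsc hs
    have hq : pvReach g q c' :=
      pvReach.step pvReach.base (pvNbrs_symm hn) hc'
        ((pvReach_val hsc).trans hval.symm)
    exact pvReach_trans hq ih


lemma pvInG_iff (x : Int × Int) :
    pvInG x = true ↔ 0 ≤ x.1 ∧ x.1 < 5 ∧ 0 ≤ x.2 ∧ x.2 < 5 := by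
  simp [pvInG]

lemma mem_pvExpandInner (g : List (List Int)) (sy sx : Int) (L : List (Int × Int))
    (acc : PySem.Set (Int × Int)) (x : Int × Int) :
    x ∈ L.foldl (fun nxt q =>
        if 0 ≤ q.1 ∧ q.1 < 5 ∧ 0 ≤ q.2 ∧ q.2 < 5 ∧
            pvIdx2 g q.1 q.2 = pvIdx2 g sy sx then PySem.Set.add nxt q else nxt) acc ↔
      x ∈ acc ∨ (x ∈ L ∧ pvInG x = true ∧ pvIdx2 g x.1 x.2 = pvIdx2 g sy sx) := by
  induction L generalizing acc with
  | nil => simp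
  | cons a L ih =>
    simp only [List.foldl_cons]
    split_ifs with h
    · rw [ih]
      simp only [PySem.Set.mem_add, List.mem_cons]
      constructor
      · rintro ((h1 | rfl) | h1)
        · exact Or.inl h1
        · exact Or.inr ⟨Or.inl rfl, by rw [pvInG_iff]; tauto, h.2.2.2.2⟩
        · tauto
      · rintro (h1 | ⟨(rfl | h1), h2, h3⟩)
        · tauto
        · tauto
        · tauto
    · rw [ih]
      simp only [List.mem_cons]
      constructor
      · tauto
      · rintro (h1 | ⟨(rfl | h1), h2, h3⟩)
        · tauto
        · exact absurd ⟨by rw [pvInG_iff] at h2; tauto, by rw [pvInG_iff] at h2; tauto,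
            by rw [pvInG_iff] at h2; tauto, by rw [pvInG_iff] at h2; tauto, h3⟩ h
        · tauto

lemma mem_pvExpand_gen (g : List (List Int)) (sy sx : Int) (comp acc : PySem.Set (Int × Int))
    (x : Int × Int) :
    x ∈ comp.foldl (fun nxt c =>
        (pvNbrs c.1 c.2).foldl (fun nxt q =>
          if 0 ≤ q.1 ∧ q.1 < 5 ∧ 0 ≤ q.2 ∧ q.2 < 5 ∧
              pvIdx2 g q.1 q.2 = pvIdx2 g sy sx then PySem.Set.add nxt q else nxt) nxt) acc ↔
      x ∈ acc ∨ ∃ c ∈ comp, x ∈ pvNbrs c.1 c.2 ∧ pvInG x = true ∧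
        pvIdx2 g x.1 x.2 = pvIdx2 g sy sx := by
  induction comp generalizing acc with
  | nil => simp
  | cons a L ih =>
    simp only [List.foldl_cons]
    rw [ih, mem_pvExpandInner]
    simp only [List.mem_cons]
    constructor
    · rintro ((h | h) | h)
      · tauto
      · exact Or.inr ⟨a, Or.inl rfl, h⟩
      · obtain ⟨c, hc, h⟩ := h; exact Or.inr ⟨c, Or.inr hc, h⟩
    · rintro (h | ⟨c, (rfl | hc), h⟩)
      · tauto
      · tauto
      · exact Or.inr ⟨c, hc, h⟩

lemma mem_pvExpand {g : List (List Int)} {sy sx : Int} {comp : PySem.Set (Int × Int)}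
    {x : Int × Int} :
    x ∈ pvExpand g sy sx comp ↔ x ∈ comp ∨ ∃ c ∈ comp, x ∈ pvNbrs c.1 c.2 ∧
      pvInG x = true ∧ pvIdx2 g x.1 x.2 = pvIdx2 g sy sx := by
  exact mem_pvExpand_gen g sy sx comp comp x

lemma nodup_pvExpandInner (g : List (List Int)) (sy sx : Int) (L : List (Int × Int))
    (acc : PySem.Set (Int × Int)) (h : acc.Nodup) :
    (L.foldl (fun nxt q =>
        if 0 ≤ q.1 ∧ q.1 < 5 ∧ 0 ≤ q.2 ∧ q.2 < 5 ∧
            pvIdx2 g q.1 q.2 = pvIdx2 g sy sx then PySem.Set.add nxt q else nxt) acc).Nodup := by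
  induction L generalizing acc with
  | nil => exact h
  | cons a L ih =>
    simp only [List.foldl_cons]
    split_ifs with hg
    · exact ih _ (PySem.Set.nodup_add acc a h)
    · exact ih _ h

lemma nodup_pvExpand_gen (g : List (List Int)) (sy sx : Int)
    (comp : List (Int × Int)) :
    ∀ acc : PySem.Set (Int × Int), acc.Nodup →
    (comp.foldl (fun nxt c =>
        (pvNbrs c.1 c.2).foldl (fun nxt q =>
          if 0 ≤ q.1 ∧ q.1 < 5 ∧ 0 ≤ q.2 ∧ q.2 < 5 ∧
              pvIdx2 g q.1 q.2 = pvIdx2 g sy sx then PySem.Set.add nxt q else nxt) nxt)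
      acc).Nodup := by
  induction comp with
  | nil => exact fun acc h => h
  | cons a L ih =>
    intro acc h
    simp only [List.foldl_cons]
    exact ih _ (nodup_pvExpandInner g sy sx _ _ h)

lemma nodup_pvExpand {g : List (List Int)} {sy sx : Int} {comp : PySem.Set (Int × Int)}
    (h : comp.Nodup) : (pvExpand g sy sx comp).Nodup :=
  nodup_pvExpand_gen g sy sx comp comp h

-- the k-th closure iterate (proof-side view of pvComponent's loop)
def pvIter (g : List (List Int)) (sy sx : Int) (k : Nat) : PySem.Set (Int × Int) :=
  (List.range k).foldl (fun comp _ => pvExpand g sy sx comp) [(sy, sx)]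

lemma pvComponent_eq_iter (g : List (List Int)) (sy sx : Int) :
    pvComponent g sy sx = pvIter g sy sx 25 := rfl

lemma pvIter_succ (g : List (List Int)) (sy sx : Int) (k : Nat) :
    pvIter g sy sx (k + 1) = pvExpand g sy sx (pvIter g sy sx k) := by
  unfold pvIter
  rw [List.range_succ, List.foldl_append]
  rfl

lemma nodup_pvIter (g : List (List Int)) (sy sx : Int) (k : Nat) :
    (pvIter g sy sx k).Nodup := by
  induction k with
  | zero => simp [pvIter]
  | succ k ih => rw [pvIter_succ]; exact nodup_pvExpand ih

lemma pvIter_mono (g : List (List Int)) (sy sx : Int) {j k : Nat} (h : j ≤ k)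
    {x : Int × Int} (hx : x ∈ pvIter g sy sx j) : x ∈ pvIter g sy sx k := by
  induction k with
  | zero =>
    have hj0 : j = 0 := by omega
    subst hj0; exact hx
  | succ k ih =>
    rcases Nat.lt_or_ge j (k+1) with hj | hj
    · rw [pvIter_succ, mem_pvExpand]
      exact Or.inl (ih (by omega))
    · have : j = k + 1 := by omega
      exact this ▸ hx

-- Finset view of one expansion step (depends only on the member set)
def pvFstep (g : List (List Int)) (sy sx : Int) (S : Finset (Int × Int)) : Finset (Int × Int) :=
  S ∪ pvGrid.filter (fun x => (∃ c ∈ S, x ∈ pvNbrs c.1 c.2) ∧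
    pvIdx2 g x.1 x.2 = pvIdx2 g sy sx)

lemma toFinset_pvExpand (g : List (List Int)) (sy sx : Int) (comp : PySem.Set (Int × Int)) :
    (pvExpand g sy sx comp).toFinset = pvFstep g sy sx comp.toFinset := by
  ext x
  simp only [List.mem_toFinset, mem_pvExpand, pvFstep, Finset.mem_union, Finset.mem_filter,
    mem_pvGrid, List.mem_toFinset]
  constructor
  · rintro (h | ⟨c, hc, h1, h2, h3⟩)
    · exact Or.inl h
    · exact Or.inr ⟨h2, ⟨c, hc, h1⟩, h3⟩
  · rintro (h | ⟨h2, ⟨c, hc, h1⟩, h3⟩)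
    · exact Or.inl h
    · exact Or.inr ⟨c, hc, h1, h2, h3⟩

lemma pvIter_toFinset_succ (g : List (List Int)) (sy sx : Int) (k : Nat) :
    (pvIter g sy sx (k + 1)).toFinset = pvFstep g sy sx (pvIter g sy sx k).toFinset := by
  rw [pvIter_succ, toFinset_pvExpand]

lemma pvIter_stab (g : List (List Int)) (sy sx : Int) {k : Nat}
    (h : (pvIter g sy sx k).toFinset = (pvIter g sy sx (k + 1)).toFinset) :
    ∀ m, k ≤ m → (pvIter g sy sx m).toFinset = (pvIter g sy sx k).toFinset := by
  intro m hm
  induction m with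
  | zero => have : k = 0 := by omega
            subst this; rfl
  | succ m ih =>
    rcases Nat.lt_or_ge k (m + 1) with hk | hk
    · have hmk : k ≤ m := by omega
      rw [pvIter_toFinset_succ, ih hmk, ← pvIter_toFinset_succ, ← h]
    · have : k = m + 1 := by omega
      subst this; rfl

lemma pvIter_inG (g : List (List Int)) {sy sx : Int} (hs : pvInG (sy, sx) = true)
    (k : Nat) {x : Int × Int} (hx : x ∈ pvIter g sy sx k) : pvInG x = true := by
  induction k with
  | zero => simp [pvIter] at hx; subst hx; exact hs
  | succ k ih =>
    rw [pvIter_succ, mem_pvExpand] at hx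
    rcases hx with h | ⟨c, _, _, h, _⟩
    · exact ih h
    · exact h

lemma pvIter_fix (g : List (List Int)) {sy sx : Int} (hs : pvInG (sy, sx) = true) :
    ∃ k < 25, (pvIter g sy sx k).toFinset = (pvIter g sy sx (k + 1)).toFinset := by
  by_contra hcon
  have hcon : ∀ k < 25, (pvIter g sy sx k).toFinset ≠ (pvIter g sy sx (k + 1)).toFinset := by
    intro k hk heq
    exact hcon ⟨k, hk, heq⟩
  have hgrow : ∀ k, k ≤ 25 → k + 1 ≤ (pvIter g sy sx k).toFinset.card := by
    intro k hk
    induction k with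
    | zero =>
      have : (sy, sx) ∈ (pvIter g sy sx 0).toFinset := by simp [pvIter]
      have := Finset.card_pos.mpr ⟨_, this⟩
      omega
    | succ k ih =>
      have hsub : (pvIter g sy sx k).toFinset ⊆ (pvIter g sy sx (k + 1)).toFinset := by
        intro x hx
        simp only [List.mem_toFinset] at hx ⊢
        exact pvIter_mono g sy sx (Nat.le_succ k) hx
      have hne := hcon k (by omega)
      have hcard := Finset.card_lt_card (Finset.ssubset_iff_subset_ne.mpr ⟨hsub, hne⟩)
      have := ih (by omega)
      omega
  have hsub : (pvIter g sy sx 25).toFinset ⊆ pvGrid := by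
    intro x hx
    simp only [List.mem_toFinset] at hx
    exact (mem_pvGrid x).mpr (pvIter_inG g hs 25 hx)
  have := Finset.card_le_card hsub
  have := hgrow 25 (le_refl _)
  have h25 := card_pvGrid
  omega

lemma pvComponent_closed (g : List (List Int)) {sy sx : Int} (hs : pvInG (sy, sx) = true)
    {x y : Int × Int} (hx : x ∈ pvComponent g sy sx) (hn : y ∈ pvNbrs x.1 x.2)
    (hgy : pvInG y = true) (hv : pvIdx2 g y.1 y.2 = pvIdx2 g sy sx) :
    y ∈ pvComponent g sy sx := by
  obtain ⟨k, hk, hfix⟩ := pvIter_fix g hs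
  have h25 := pvIter_stab g sy sx hfix 25 (by omega)
  have h26 := pvIter_stab g sy sx hfix 26 (by omega)
  have key : (pvIter g sy sx 26).toFinset = (pvIter g sy sx 25).toFinset := by
    rw [h25, h26]
  have hy : y ∈ pvIter g sy sx 26 := by
    rw [show (26 : Nat) = 25 + 1 from rfl, pvIter_succ, mem_pvExpand]
    exact Or.inr ⟨x, hx, hn, hgy, hv⟩
  have : y ∈ (pvIter g sy sx 25).toFinset := by
    rw [← key]; simpa using hy
  simpa [pvComponent_eq_iter] using this

lemma reach_sub_component (g : List (List Int)) {sy sx : Int} (hs : pvInG (sy, sx) = true)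
    {x : Int × Int} (h : pvReach g (sy, sx) x) : x ∈ pvComponent g sy sx := by
  induction h with
  | base =>
    have h0 : (sy, sx) ∈ pvIter g sy sx 0 := by simp [pvIter]
    exact pvIter_mono g sy sx (by omega) h0
  | step _ hn hg hv ih => exact pvComponent_closed g hs ih hn hg hv

lemma component_sub_reach (g : List (List Int)) (sy sx : Int)
    {x : Int × Int} (h : x ∈ pvComponent g sy sx) : pvReach g (sy, sx) x := by
  rw [pvComponent_eq_iter] at h
  have : ∀ k, ∀ y : Int × Int, y ∈ pvIter g sy sx k → pvReach g (sy, sx) y := by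
    intro k
    induction k with
    | zero => intro y hy; simp [pvIter] at hy; subst hy; exact pvReach.base
    | succ k ih =>
      intro y hy
      rw [pvIter_succ, mem_pvExpand] at hy
      rcases hy with hy | ⟨c, hc, h1, h2, h3⟩
      · exact ih y hy
      · exact pvReach.step (ih c hc) h1 h2 h3
  exact this 25 x h

lemma mem_pvComponent (g : List (List Int)) {s : Int × Int} (hs : pvInG s = true)
    (x : Int × Int) : x ∈ pvComponent g s.1 s.2 ↔ pvReach g s x := by
  constructor
  · intro h; exact component_sub_reach g s.1 s.2 h
  · intro h; exact reach_sub_component g hs h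

lemma nodup_pvComponent (g : List (List Int)) (sy sx : Int) :
    (pvComponent g sy sx).Nodup := by
  rw [pvComponent_eq_iter]; exact nodup_pvIter g sy sx 25

lemma pvComponent_length_eq (g : List (List Int)) {a p : Int × Int}
    (ha : pvInG a = true) (hp : pvInG p = true) (h : pvReach g a p) :
    (pvComponent g p.1 p.2).length = (pvComponent g a.1 a.2).length := by
  have hmem : ∀ x, x ∈ pvComponent g p.1 p.2 ↔ x ∈ pvComponent g a.1 a.2 := by
    intro x
    rw [mem_pvComponent g hp, mem_pvComponent g ha]
    constructor
    · intro hx; exact pvReach_trans h hx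
    · intro hx; exact pvReach_trans (pvReach_symm ha h) hx
  exact List.Perm.length_eq
    ((List.perm_ext_iff_of_nodup (nodup_pvComponent g p.1 p.2)
      (nodup_pvComponent g a.1 a.2)).mpr hmem)

-- ---- 5x5 matrix lemmas ----
def pvMat5 (m : List (List Int)) : Prop := m.length = 5 ∧ ∀ r ∈ m, r.length = 5

lemma pvMat5_replicate : pvMat5 (List.replicate 5 (List.replicate 5 (0 : Int))) := by
  constructor
  · simp
  · intro r hr
    rw [List.eq_of_mem_replicate hr]
    simp

lemma pvPyGetD_mem {α : Type} (xs : List α) (i : Int) (d : α) :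
    PySem.List.pyGetD xs i d = d ∨ PySem.List.pyGetD xs i d ∈ xs := by
  simp only [PySem.List.pyGetD, PySem.List.pyGet?]
  cases hk : PySem.List.pyIdx? xs.length i with
  | none => simp [hk]
  | some k =>
    cases hg : xs[k]? with
    | none => simp [hk, hg]
    | some v => simp [hk, hg]; exact Or.inr (List.mem_of_getElem? hg)

lemma pvIdx2_replicate (y x : Int) :
    pvIdx2 (List.replicate 5 (List.replicate 5 (0 : Int))) y x = 0 := by
  unfold pvIdx2
  rcases pvPyGetD_mem (List.replicate 5 (List.replicate 5 (0 : Int))) y [] with h | h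
  · rw [h]
    rcases pvPyGetD_mem ([] : List Int) x 0 with h2 | h2
    · exact h2
    · simp at h2
  · rw [List.eq_of_mem_replicate h]
    rcases pvPyGetD_mem (List.replicate 5 (0 : Int)) x 0 with h2 | h2
    · exact h2
    · exact List.eq_of_mem_replicate h2

lemma pvMat5_set2 {m : List (List Int)} (h : pvMat5 m) {y x : Int}
    (hy : 0 ≤ y ∧ y < 5) (hx : 0 ≤ x) (v : Int) : pvMat5 (pvSet2 m y x v) := by
  obtain ⟨hlen, hrows⟩ := h
  have hrow : PySem.List.pyGetD m y [] = m[y.toNat] := by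
    rw [PySem.List.pyGetD_eq_getElem _ _ hy.1 (by omega)]
  constructor
  · rw [pvSet2, PySem.List.length_pySetD, hlen]
  · intro r hr
    rw [pvSet2, PySem.List.pySetD_of_nonneg _ _ hy.1] at hr
    rcases List.mem_or_eq_of_mem_set hr with h | h
    · exact hrows r h
    · subst h
      rw [PySem.List.length_pySetD, hrow]
      exact hrows _ (List.getElem_mem _)

lemma pvIdx2_set2 {m : List (List Int)} (hm : pvMat5 m) {y x y' x' : Int}
    (hy : 0 ≤ y ∧ y < 5) (hx : 0 ≤ x ∧ x < 5) (hy' : 0 ≤ y' ∧ y' < 5)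
    (hx' : 0 ≤ x' ∧ x' < 5) (v : Int) :
    pvIdx2 (pvSet2 m y x v) y' x' = if y' = y ∧ x' = x then v else pvIdx2 m y' x' := by
  obtain ⟨a, rfl⟩ : ∃ a : Nat, y = (a : Int) := ⟨y.toNat, (Int.toNat_of_nonneg hy.1).symm⟩
  obtain ⟨b, rfl⟩ : ∃ b : Nat, x = (b : Int) := ⟨x.toNat, (Int.toNat_of_nonneg hx.1).symm⟩
  obtain ⟨a', rfl⟩ : ∃ a : Nat, y' = (a : Int) := ⟨y'.toNat, (Int.toNat_of_nonneg hy'.1).symm⟩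
  obtain ⟨b', rfl⟩ : ∃ b : Nat, x' = (b : Int) := ⟨x'.toNat, (Int.toNat_of_nonneg hx'.1).symm⟩
  obtain ⟨hlen, hrows⟩ := hm
  unfold pvIdx2 pvSet2
  rw [PySem.List.pyGetD_pySetD_natCast _ _ _ _ _ (by omega)]
  by_cases hyy : a' = a
  · subst hyy
    have hrow : PySem.List.pyGetD m (a' : Int) [] = m[a']'(by omega) := by
      rw [PySem.List.pyGetD_eq_getElem _ _ (by omega) (by push_cast; omega)]
      simp
    have hrowlen : (m[a']'(by omega)).length = 5 := hrows _ (List.getElem_mem _)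
    simp only [if_true, true_and]
    rw [hrow, PySem.List.pyGetD_pySetD_natCast _ _ _ _ _ (by omega)]
    by_cases hxx : b' = b
    · subst hxx
      simp
    · have h1 : ¬ ((b' : Int) = (b : Int)) := by exact_mod_cast hxx
      simp [hxx, h1]
  · have h1 : ¬ ((a' : Int) = (a : Int)) := by exact_mod_cast hyy
    simp [hyy, h1]

-- relics marking fold: writes 1 at every cell of cand
lemma pvMarkFold_mat5 (cand : List (Int × Int)) (hc : ∀ c ∈ cand, pvInG c = true) :
    ∀ r : List (List Int), pvMat5 r →
      pvMat5 (cand.foldl (fun r c => pvSet2 r c.1 c.2 1) r) := by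
  induction cand with
  | nil => exact fun r h => h
  | cons a L ih =>
    intro r hr
    simp only [List.foldl_cons]
    have ha := (pvInG_iff a).mp (hc a (by simp))
    exact ih (fun c h => hc c (by simp [h])) _ (pvMat5_set2 hr ⟨ha.1, ha.2.1⟩ ha.2.2.1 1)

lemma pvMarkFold_idx (cand : List (Int × Int)) (hc : ∀ c ∈ cand, pvInG c = true)
    {p : Int × Int} (hp : pvInG p = true) :
    ∀ r : List (List Int), pvMat5 r →
      pvIdx2 (cand.foldl (fun r c => pvSet2 r c.1 c.2 1) r) p.1 p.2 =
        if p ∈ cand then 1 else pvIdx2 r p.1 p.2 := by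
  induction cand with
  | nil => simp
  | cons a L ih =>
    intro r hr
    simp only [List.foldl_cons]
    have ha := (pvInG_iff a).mp (hc a (by simp))
    have hpg := (pvInG_iff p).mp hp
    rw [ih (fun c h => hc c (by simp [h])) _ (pvMat5_set2 hr ⟨ha.1, ha.2.1⟩ ha.2.2.1 1)]
    by_cases hmem : p ∈ L
    · simp [hmem]
    · simp only [hmem, if_false, List.mem_cons]
      rw [pvIdx2_set2 hr ⟨ha.1, ha.2.1⟩ ⟨ha.2.2.1, ha.2.2.2⟩ ⟨hpg.1, hpg.2.1⟩
        ⟨hpg.2.2.1, hpg.2.2.2⟩ 1]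
      by_cases hpa : p = a
      · subst hpa
        simp
      · have : ¬ (p.1 = a.1 ∧ p.2 = a.2) := by
          intro hcontra
          exact hpa (Prod.ext hcontra.1 hcontra.2)
        simp [hpa, this, hmem]

-- checked-matrix characterization
def pvChk (checked : List (List Int)) (C0 : Int × Int → Prop) (cand : List (Int × Int)) : Prop :=
  ∀ p : Int × Int, pvInG p = true → (pvIdx2 checked p.1 p.2 ≠ 0 ↔ (C0 p ∨ p ∈ cand))

-- the BFS while-loop invariant
def pvJ (g : List (List Int)) (s : Int × Int) (C0 : Int × Int → Prop)
    (q cand : List (Int × Int)) (checked : List (List Int)) : Prop :=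
  pvMat5 checked ∧ cand.Nodup ∧ (∀ c ∈ cand, pvReach g s c) ∧ q ⊆ cand ∧ q.Nodup ∧
  s ∈ cand ∧ pvChk checked C0 cand ∧
  (∀ c ∈ cand, c ∉ q → ∀ x, x ∈ pvNbrs c.1 c.2 → pvInG x = true →
    pvIdx2 g x.1 x.2 = pvIdx2 g s.1 s.2 → (C0 x ∨ x ∈ cand))

-- processing the four neighbour offsets of a popped cell c
lemma pvInnerFold_spec (g : List (List Int)) (s : Int × Int) (C0 : Int × Int → Prop)
    (c : Int × Int) (hcR : pvReach g s c) :
    ∀ (L : List (Int × Int)), (∀ o ∈ L, o ∈ pv_dy.zip pv_dx) →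
    ∀ (q0 cd : List (Int × Int)) (ch : List (List Int)),
      pvMat5 ch → cd.Nodup → (∀ x ∈ cd, pvReach g s x) → pvChk ch C0 cd →
    ∃ N : List (Int × Int),
      (L.foldl (pvBfsStep g s.1 s.2 c.1 c.2) (q0, ch, cd)).1 = q0 ++ N ∧
      (L.foldl (pvBfsStep g s.1 s.2 c.1 c.2) (q0, ch, cd)).2.2 = cd ++ N ∧
      pvMat5 (L.foldl (pvBfsStep g s.1 s.2 c.1 c.2) (q0, ch, cd)).2.1 ∧
      (cd ++ N).Nodup ∧
      (∀ x ∈ N, pvReach g s x ∧ pvInG x = true ∧ x ∉ cd) ∧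
      pvChk (L.foldl (pvBfsStep g s.1 s.2 c.1 c.2) (q0, ch, cd)).2.1 C0 (cd ++ N) ∧
      (∀ o ∈ L, pvInG (c.1 + o.1, c.2 + o.2) = true →
        pvIdx2 g (c.1 + o.1) (c.2 + o.2) = pvIdx2 g s.1 s.2 →
        (C0 (c.1 + o.1, c.2 + o.2) ∨ (c.1 + o.1, c.2 + o.2) ∈ cd ++ N)) := by
  intro L
  induction L with
  | nil =>
    intro _ q0 cd ch h1 h2 h3 h4
    exact ⟨[], by simp, by simp, h1, by simpa using h2, by simp, by simpa using h4, by simp⟩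
  | cons o L ih =>
    intro hL q0 cd ch h1 h2 h3 h4
    simp only [List.foldl_cons]
    by_cases hcond : 0 ≤ c.1 + o.1 ∧ c.1 + o.1 < 5 ∧ 0 ≤ c.2 + o.2 ∧ c.2 + o.2 < 5 ∧
        pvIdx2 ch (c.1 + o.1) (c.2 + o.2) = 0 ∧
        pvIdx2 g (c.1 + o.1) (c.2 + o.2) = pvIdx2 g s.1 s.2
    · -- a new cell x is enqueued, checked and made a candidate
      set x : Int × Int := (c.1 + o.1, c.2 + o.2) with hxdef
      have hstep : pvBfsStep g s.1 s.2 c.1 c.2 (q0, ch, cd) o =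
          (q0 ++ [x], pvSet2 ch x.1 x.2 1, cd ++ [x]) := by
        simp only [pvBfsStep, hxdef]
        rw [if_pos hcond]
      have hxg : pvInG x = true := by rw [pvInG_iff]; exact ⟨hcond.1, hcond.2.1, hcond.2.2.1, hcond.2.2.2.1⟩
      have hx0 : pvIdx2 ch x.1 x.2 = 0 := hcond.2.2.2.2.1
      have hxfresh : ¬ (C0 x ∨ x ∈ cd) := fun hmem => ((h4 x hxg).mpr hmem) hx0
      have hxnbr : x ∈ pvNbrs c.1 c.2 :=
        pvNbrs_iff_offset.mpr ⟨o, hL o (by simp), rfl⟩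
      have hxR : pvReach g s x :=
        pvReach.step hcR hxnbr hxg hcond.2.2.2.2.2
      have hxGm := (pvInG_iff x).mp hxg
      have hch' : pvChk (pvSet2 ch x.1 x.2 1) C0 (cd ++ [x]) := by
        intro p hpg
        have hpG := (pvInG_iff p).mp hpg
        rw [pvIdx2_set2 h1 ⟨hxGm.1, hxGm.2.1⟩ ⟨hxGm.2.2.1, hxGm.2.2.2⟩
          ⟨hpG.1, hpG.2.1⟩ ⟨hpG.2.2.1, hpG.2.2.2⟩ 1]
        by_cases hpx : p = x
        · subst hpx
          simp
        · have : ¬ (p.1 = x.1 ∧ p.2 = x.2) := fun hc2 => hpx (Prod.ext hc2.1 hc2.2)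
          simp only [this, if_false, List.mem_append, List.mem_singleton, hpx, or_false]
          exact h4 p hpg
      obtain ⟨N, hq, hcand, hmat, hnd, hN, hchk, hcov⟩ :=
        ih (fun o' ho' => hL o' (by simp [ho'])) (q0 ++ [x]) (cd ++ [x])
          (pvSet2 ch x.1 x.2 1)
          (pvMat5_set2 h1 ⟨hxGm.1, hxGm.2.1⟩ hxGm.2.2.1 1)
          (h2.append (List.nodup_singleton x) (by
            intro a ha hax
            have hax' : a = x := by simpa using hax
            subst hax'
            exact hxfresh (Or.inr ha)))
          (by
            intro y hy
            rcases List.mem_append.mp hy with h | h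
            · exact h3 y h
            · simp at h; subst h; exact hxR)
          hch'
      refine ⟨x :: N, ?_, ?_, ?_, ?_, ?_, ?_, ?_⟩
      · rw [hstep] at *
        rw [hq, List.append_assoc]
        rfl
      · rw [hstep] at *
        rw [hcand, List.append_assoc]
        rfl
      · rw [hstep] at *
        exact hmat
      · rw [show cd ++ x :: N = (cd ++ [x]) ++ N by simp]
        exact hnd
      · intro y hy
        rcases List.mem_cons.mp hy with rfl | hyN
        · exact ⟨hxR, hxg, fun hmem => hxfresh (Or.inr hmem)⟩
        · obtain ⟨hr, hg, hnm⟩ := hN y hyN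
          exact ⟨hr, hg, fun hmem => hnm (List.mem_append.mpr (Or.inl hmem))⟩
      · rw [hstep] at *
        rw [show cd ++ x :: N = (cd ++ [x]) ++ N by simp]
        exact hchk
      · intro o' ho'
        rcases List.mem_cons.mp ho' with rfl | ho'
        · intro _ _
          right
          exact List.mem_append.mpr (Or.inr (List.mem_cons_self))
        · intro hg2 hv2
          rcases hcov o' ho' hg2 hv2 with h | h
          · exact Or.inl h
          · right
            rw [show cd ++ x :: N = (cd ++ [x]) ++ N by simp]
            exact h
    · -- nothing happens for this offset
      have hstep : pvBfsStep g s.1 s.2 c.1 c.2 (q0, ch, cd) o = (q0, ch, cd) := by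
        simp only [pvBfsStep]
        rw [if_neg hcond]
      rw [hstep]
      obtain ⟨N, hq, hcand, hmat, hnd, hN, hchk, hcov⟩ :=
        ih (fun o' ho' => hL o' (by simp [ho'])) q0 cd ch h1 h2 h3 h4
      refine ⟨N, hq, hcand, hmat, hnd, hN, hchk, ?_⟩
      intro o' ho'
      rcases List.mem_cons.mp ho' with rfl | ho'
      · intro hg2 hv2
        have hb := (pvInG_iff _).mp hg2
        have hne : pvIdx2 ch (c.1 + o'.1) (c.2 + o'.2) ≠ 0 := by
          intro h0
          exact hcond ⟨hb.1, hb.2.1, hb.2.2.1, hb.2.2.2, h0, hv2⟩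
        rcases (h4 _ hg2).mp hne with h | h
        · exact Or.inl h
        · exact Or.inr (List.mem_append.mpr (Or.inl h))
      · exact hcov o' ho'

lemma pvJ_complete (g : List (List Int)) (s : Int × Int) (C0 : Int × Int → Prop)
    (hC0 : ∀ p, C0 p → ¬ pvReach g s p)
    (cand : List (Int × Int)) (checked : List (List Int))
    (hJ : pvJ g s C0 [] cand checked) : ∀ x, x ∈ cand ↔ pvReach g s x := by
  obtain ⟨_, _, h2, _, _, h6, _, h8⟩ := hJ
  intro x
  constructor
  · exact h2 x
  · intro hr
    induction hr with
    | base => exact h6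
    | step hc hn hg hv ih =>
      rename_i c' y
      rcases h8 c' ih (by simp) y hn hg hv with h | h
      · exact absurd (pvReach.step hc hn hg hv) (hC0 y h)
      · exact h

set_option maxHeartbeats 1000000 in
lemma pvBfsLoop_spec (g : List (List Int)) (s : Int × Int) (C0 : Int × Int → Prop)
    (hC0 : ∀ p, C0 p → ¬ pvReach g s p) (hs : pvInG s = true) :
    ∀ (fuel : Nat) (q cand : List (Int × Int)) (checked : List (List Int)),
      pvJ g s C0 q cand checked →
      2 * (((pvComponent g s.1 s.2).toFinset \ cand.toFinset).card) + q.length ≤ fuel →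
      pvMat5 (pvBfsLoop g s.1 s.2 fuel q checked cand).1 ∧
      (pvBfsLoop g s.1 s.2 fuel q checked cand).2.Nodup ∧
      (∀ x, x ∈ (pvBfsLoop g s.1 s.2 fuel q checked cand).2 ↔ pvReach g s x) ∧
      (∀ p : Int × Int, pvInG p = true →
        (pvIdx2 (pvBfsLoop g s.1 s.2 fuel q checked cand).1 p.1 p.2 ≠ 0 ↔
          (C0 p ∨ pvReach g s p))) := by
  intro fuel
  induction fuel with
  | zero =>
    intro q cand checked hJ hfuel
    have hq : q = [] := by
      cases q with
      | nil => rfl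
      | cons a l => simp at hfuel
    subst hq
    have hcomp := pvJ_complete g s C0 hC0 cand checked hJ
    obtain ⟨h1, h2, _, _, _, _, h7, _⟩ := hJ
    refine ⟨h1, h2, hcomp, ?_⟩
    intro p hp
    rw [show pvBfsLoop g s.1 s.2 0 [] checked cand = (checked, cand) from rfl]
    rw [h7 p hp, hcomp p]
  | succ fuel ih =>
    intro q cand checked hJ hfuel
    cases q with
    | nil =>
      have hcomp := pvJ_complete g s C0 hC0 cand checked hJ
      obtain ⟨h1, h2, _, _, _, _, h7, _⟩ := hJ
      refine ⟨h1, h2, hcomp, ?_⟩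
      intro p hp
      rw [show pvBfsLoop g s.1 s.2 (fuel + 1) [] checked cand = (checked, cand) from rfl]
      rw [h7 p hp, hcomp p]
    | cons c q' =>
      obtain ⟨h1, h2, h3, h4, h5, h6, h7, h8⟩ := hJ
      have hc : c ∈ cand := h4 (List.mem_cons_self)
      have hcq' : c ∉ q' := (List.nodup_cons.mp h5).1
      have hcR : pvReach g s c := h3 c hc
      obtain ⟨N, hq, hcand, hmat, hnd, hN, hchk, hcov⟩ :=
        pvInnerFold_spec g s C0 c hcR (pv_dy.zip pv_dx) (fun o ho => ho)
          q' cand checked h1 h2 h3 h7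
      -- the new invariant
      have hJ' : pvJ g s C0 (q' ++ N) (cand ++ N) (pvBfsInner g s.1 s.2 c.1 c.2 (q', checked, cand)).2.1 := by
        refine ⟨hmat, hnd, ?_, ?_, ?_, ?_, hchk, ?_⟩
        · intro x hx
          rcases List.mem_append.mp hx with h | h
          · exact h3 x h
          · exact (hN x h).1
        · intro x hx
          rcases List.mem_append.mp hx with h | h
          · exact List.mem_append.mpr (Or.inl (h4 (List.mem_cons_of_mem c h)))
          · exact List.mem_append.mpr (Or.inr h)
        · have hq'nd : q'.Nodup := (List.nodup_cons.mp h5).2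
          have hNnd : N.Nodup := (List.nodup_append.mp hnd).2.1
          refine List.Nodup.append hq'nd hNnd ?_
          intro a ha haN
          exact ((hN a haN).2.2) (h4 (List.mem_cons_of_mem c ha))
        · exact List.mem_append.mpr (Or.inl h6)
        · intro d hd hdq x hxn hxg hxv
          rcases List.mem_append.mp hd with hdc | hdN
          · by_cases hdc2 : d = c
            · subst hdc2
              obtain ⟨o, ho, hxo⟩ := pvNbrs_iff_offset.mp hxn
              subst hxo
              exact hcov o ho hxg hxv
            · have : d ∉ c :: q' := by
                intro hmem
                rcases List.mem_cons.mp hmem with h | h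
                · exact hdc2 h
                · exact hdq (List.mem_append.mpr (Or.inl h))
              rcases h8 d hdc this x hxn hxg hxv with h | h
              · exact Or.inl h
              · exact Or.inr (List.mem_append.mpr (Or.inl h))
          · exact absurd (List.mem_append.mpr (Or.inr hdN)) hdq
      -- the measure decreases
      have hmeasure :
          2 * (((pvComponent g s.1 s.2).toFinset \ (cand ++ N).toFinset).card) +
            (q' ++ N).length ≤ fuel := by
        have hNsub : N.toFinset ⊆ (pvComponent g s.1 s.2).toFinset \ cand.toFinset := by
          intro x hx
          rw [List.mem_toFinset] at hx
          rw [Finset.mem_sdiff, List.mem_toFinset, List.mem_toFinset]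
          exact ⟨reach_sub_component g hs ((hN x hx).1), (hN x hx).2.2⟩
        have hNnd : N.Nodup := (List.nodup_append.mp hnd).2.1
        have hNcard : N.toFinset.card = N.length := List.toFinset_card_of_nodup hNnd
        have happ : (cand ++ N).toFinset = cand.toFinset ∪ N.toFinset := List.toFinset_append
        have hsdiff : (pvComponent g s.1 s.2).toFinset \ (cand ++ N).toFinset =
            ((pvComponent g s.1 s.2).toFinset \ cand.toFinset) \ N.toFinset := by
          ext x
          simp only [Finset.mem_sdiff, List.mem_toFinset, List.mem_append]
          exact ⟨fun ⟨h1, h2⟩ => ⟨⟨h1, fun hc => h2 (Or.inl hc)⟩, fun hn => h2 (Or.inr hn)⟩,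
            fun ⟨⟨h1, h2⟩, h3⟩ => ⟨h1, fun hc => hc.elim h2 h3⟩⟩
        have hk : N.toFinset.card ≤
            ((pvComponent g s.1 s.2).toFinset \ cand.toFinset).card :=
          Finset.card_le_card hNsub
        rw [hsdiff, Finset.card_sdiff, Finset.inter_eq_left.mpr hNsub, hNcard, List.length_append]
        simp only [List.length_cons] at hfuel
        omega
      have hunf : pvBfsInner g s.1 s.2 c.1 c.2 (q', checked, cand) =
          (pv_dy.zip pv_dx).foldl (pvBfsStep g s.1 s.2 c.1 c.2) (q', checked, cand) := rfl
      have := ih (q' ++ N) (cand ++ N)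
        ((pv_dy.zip pv_dx).foldl (pvBfsStep g s.1 s.2 c.1 c.2) (q', checked, cand)).2.1
        (by rw [← hunf]; exact hJ') hmeasure
      rw [show pvBfsLoop g s.1 s.2 (fuel + 1) (c :: q') checked cand =
        pvBfsLoop g s.1 s.2 fuel (pvBfsInner g s.1 s.2 c.1 c.2 (q', checked, cand)).1
          (pvBfsInner g s.1 s.2 c.1 c.2 (q', checked, cand)).2.1
          (pvBfsInner g s.1 s.2 c.1 c.2 (q', checked, cand)).2.2 from rfl,
        hunf, hq, hcand]
      exact this

-- relics invariant after processing the starts in P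
def pvRel (g : List (List Int)) (P : List (Int × Int)) (relics : List (List Int)) : Prop :=
  ∀ p : Int × Int, pvInG p = true →
    (((∃ a ∈ P, pvReach g a p) ∧ 3 ≤ (pvComponent g p.1 p.2).length) →
      pvIdx2 relics p.1 p.2 = 1) ∧
    (¬ ((∃ a ∈ P, pvReach g a p) ∧ 3 ≤ (pvComponent g p.1 p.2).length) →
      pvIdx2 relics p.1 p.2 = 0)

lemma pvExists_append (g : List (List Int)) (P : List (Int × Int)) (s p : Int × Int)
    (hx : ¬ pvReach g s p) :
    (∃ a ∈ P ++ [s], pvReach g a p) ↔ (∃ a ∈ P, pvReach g a p) := by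
  constructor
  · rintro ⟨a, ha, hr⟩
    rcases List.mem_append.mp ha with h | h
    · exact ⟨a, h, hr⟩
    · have : a = s := by simpa using h
      subst this
      exact absurd hr hx
  · rintro ⟨a, ha, hr⟩
    exact ⟨a, List.mem_append.mpr (Or.inl ha), hr⟩

set_option maxHeartbeats 1000000 in
lemma pvBfs_spec (g : List (List Int)) (P : List (Int × Int)) (s : Int × Int)
    (hs : pvInG s = true) (hP : ∀ a ∈ P, pvInG a = true)
    (checked relics : List (List Int))
    (hMat : pvMat5 checked) (hMatR : pvMat5 relics)
    (hch : ∀ p : Int × Int, pvInG p = true →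
      (pvIdx2 checked p.1 p.2 ≠ 0 ↔ ∃ a ∈ P, pvReach g a p))
    (hrel : pvRel g P relics)
    (hnew : ¬ ∃ a ∈ P, pvReach g a s) :
    pvMat5 (pvBfs g s checked relics).1 ∧ pvMat5 (pvBfs g s checked relics).2 ∧
    (∀ p : Int × Int, pvInG p = true → (pvIdx2 (pvBfs g s checked relics).1 p.1 p.2 ≠ 0 ↔
        ∃ a ∈ P ++ [s], pvReach g a p)) ∧
    pvRel g (P ++ [s]) (pvBfs g s checked relics).2 := by
  have hsG := (pvInG_iff s).mp hs
  set C0 : Int × Int → Prop := fun p => ∃ a ∈ P, pvReach g a p with hC0def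
  have hC0 : ∀ p, C0 p → ¬ pvReach g s p := by
    rintro p ⟨a, ha, hap⟩ hsp
    exact hnew ⟨a, ha, pvReach_trans hap (pvReach_symm hs hsp)⟩
  have hJ : pvJ g s C0 [s] [s] (pvSet2 checked s.1 s.2 1) := by
    refine ⟨pvMat5_set2 hMat ⟨hsG.1, hsG.2.1⟩ hsG.2.2.1 1, List.nodup_singleton s,
      ?_, fun x hx => hx, List.nodup_singleton s, List.mem_singleton_self s, ?_, ?_⟩
    · intro c hc
      have : c = s := by simpa using hc
      subst this
      exact pvReach.base
    · intro p hp
      have hpG := (pvInG_iff p).mp hp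
      rw [pvIdx2_set2 hMat ⟨hsG.1, hsG.2.1⟩ ⟨hsG.2.2.1, hsG.2.2.2⟩
        ⟨hpG.1, hpG.2.1⟩ ⟨hpG.2.2.1, hpG.2.2.2⟩ 1]
      by_cases hps : p = s
      · subst hps
        simp
      · have : ¬ (p.1 = s.1 ∧ p.2 = s.2) := fun hc2 => hps (Prod.ext hc2.1 hc2.2)
        simp only [this, if_false, List.mem_singleton, hps, or_false]
        exact hch p hp
    · intro c hc hcq
      have : c = s := by simpa using hc
      subst this
      exact absurd (List.mem_singleton_self c) hcq
  have hfuel : 2 * (((pvComponent g s.1 s.2).toFinset \ ([s] : List (Int × Int)).toFinset).card) +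
      ([s] : List (Int × Int)).length ≤ 51 := by
    have hsub : (pvComponent g s.1 s.2).toFinset ⊆ pvGrid := by
      intro x hx
      rw [List.mem_toFinset] at hx
      exact (mem_pvGrid x).mpr (pvReach_inG (component_sub_reach g s.1 s.2 hx) hs)
    have h1 : ((pvComponent g s.1 s.2).toFinset \ ([s] : List (Int × Int)).toFinset).card ≤
        (pvComponent g s.1 s.2).toFinset.card :=
      Finset.card_le_card (Finset.sdiff_subset)
    have h2 := Finset.card_le_card hsub
    have h3 := card_pvGrid
    simp only [List.length_singleton]
    omega
  obtain ⟨hlmat, hlnd, hlmem, hlchk⟩ :=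
    pvBfsLoop_spec g s C0 hC0 hs 51 [s] [s] (pvSet2 checked s.1 s.2 1) hJ hfuel
  set res := pvBfsLoop g s.1 s.2 51 [s] (pvSet2 checked s.1 s.2 1) [s] with hresdef
  have hbfs : pvBfs g s checked relics =
      (res.1, if 3 ≤ res.2.length then
        res.2.foldl (fun r c => pvSet2 r c.1 c.2 1) relics else relics) := by
    rw [pvBfs]
    split_ifs <;> rfl
  have hlen : res.2.length = (pvComponent g s.1 s.2).length := by
    refine List.Perm.length_eq
      ((List.perm_ext_iff_of_nodup hlnd (nodup_pvComponent g s.1 s.2)).mpr ?_)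
    intro x
    rw [hlmem x, mem_pvComponent g hs]
  have hchkfin : ∀ p : Int × Int, pvInG p = true →
      (pvIdx2 res.1 p.1 p.2 ≠ 0 ↔ ∃ a ∈ P ++ [s], pvReach g a p) := by
    intro p hp
    rw [hlchk p hp]
    constructor
    · rintro (h | h)
      · obtain ⟨a, ha, hr⟩ := h
        exact ⟨a, List.mem_append.mpr (Or.inl ha), hr⟩
      · exact ⟨s, List.mem_append.mpr (Or.inr (List.mem_singleton_self s)), h⟩
    · rintro ⟨a, ha, hr⟩
      rcases List.mem_append.mp ha with h | h
      · exact Or.inl ⟨a, h, hr⟩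
      · have : a = s := by simpa using h
        subst this
        exact Or.inr hr
  have hcandG : ∀ c ∈ res.2, pvInG c = true := by
    intro c hcm
    exact pvReach_inG ((hlmem c).mp hcm) hs
  rw [hbfs]
  by_cases hbig : 3 ≤ res.2.length
  · simp only [hbig, if_true]
    refine ⟨hlmat, pvMarkFold_mat5 res.2 hcandG relics hMatR, hchkfin, ?_⟩
    intro p hp
    rw [pvMarkFold_idx res.2 hcandG hp relics hMatR]
    by_cases hmem : p ∈ res.2
    · have hrs : pvReach g s p := (hlmem p).mp hmem
      have hcond : (∃ a ∈ P ++ [s], pvReach g a p) ∧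
          3 ≤ (pvComponent g p.1 p.2).length := by
        refine ⟨⟨s, List.mem_append.mpr (Or.inr (List.mem_singleton_self s)), hrs⟩, ?_⟩
        rw [pvComponent_length_eq g hs (pvReach_inG hrs hs) hrs, ← hlen]
        exact hbig
      simp only [hmem, if_true]
      exact ⟨fun _ => by simp, fun hn => absurd hcond hn⟩
    · have hnrs : ¬ pvReach g s p := fun hr => hmem ((hlmem p).mpr hr)
      simp only [hmem, if_false]
      rw [show ((∃ a ∈ P ++ [s], pvReach g a p) ∧ 3 ≤ (pvComponent g p.1 p.2).length) ↔
          ((∃ a ∈ P, pvReach g a p) ∧ 3 ≤ (pvComponent g p.1 p.2).length) by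
        rw [pvExists_append g P s p hnrs]]
      exact hrel p hp
  · simp only [hbig, if_false]
    refine ⟨hlmat, hMatR, hchkfin, ?_⟩
    intro p hp
    by_cases hrs : pvReach g s p
    · have hlenp : (pvComponent g p.1 p.2).length = res.2.length := by
        rw [pvComponent_length_eq g hs (pvReach_inG hrs hs) hrs, hlen]
      have hcondfalse : ¬ ((∃ a ∈ P ++ [s], pvReach g a p) ∧
          3 ≤ (pvComponent g p.1 p.2).length) := by
        rintro ⟨_, hlen3⟩
        rw [hlenp] at hlen3
        exact hbig hlen3
      have holdfalse : ¬ ((∃ a ∈ P, pvReach g a p) ∧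
          3 ≤ (pvComponent g p.1 p.2).length) := by
        rintro ⟨⟨a, ha, hr⟩, _⟩
        exact hnew ⟨a, ha, pvReach_trans hr (pvReach_symm hs hrs)⟩
      exact ⟨fun hcond => absurd hcond hcondfalse,
        fun _ => (hrel p hp).2 holdfalse⟩
    · rw [show ((∃ a ∈ P ++ [s], pvReach g a p) ∧ 3 ≤ (pvComponent g p.1 p.2).length) ↔
          ((∃ a ∈ P, pvReach g a p) ∧ 3 ≤ (pvComponent g p.1 p.2).length) by
        rw [pvExists_append g P s p hrs]]
      exact hrel p hp

lemma pvExists_extend (g : List (List Int)) (P : List (Int × Int)) {a : Int × Int}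
    (ha : ∃ a' ∈ P, pvReach g a' a) (haG : pvInG a = true) (p : Int × Int) :
    (∃ b ∈ P ++ [a], pvReach g b p) ↔ (∃ b ∈ P, pvReach g b p) := by
  constructor
  · rintro ⟨b, hb, hr⟩
    rcases List.mem_append.mp hb with h | h
    · exact ⟨b, h, hr⟩
    · have : b = a := by simpa using h
      subst this
      obtain ⟨a', ha', hr'⟩ := ha
      exact ⟨a', ha', pvReach_trans hr' hr⟩
  · rintro ⟨b, hb, hr⟩
    exact ⟨b, List.mem_append.mpr (Or.inl hb), hr⟩

lemma pvOuter_spec (g : List (List Int)) :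
    ∀ (Q P : List (Int × Int)) (checked relics : List (List Int)),
      (∀ a ∈ Q, pvInG a = true) → (∀ a ∈ P, pvInG a = true) →
      pvMat5 checked → pvMat5 relics →
      (∀ p : Int × Int, pvInG p = true →
        (pvIdx2 checked p.1 p.2 ≠ 0 ↔ ∃ a ∈ P, pvReach g a p)) →
      pvRel g P relics →
      pvMat5 (Q.foldl (pvOuterStep g) (checked, relics)).1 ∧
      pvMat5 (Q.foldl (pvOuterStep g) (checked, relics)).2 ∧
      (∀ p : Int × Int, pvInG p = true →
        (pvIdx2 (Q.foldl (pvOuterStep g) (checked, relics)).1 p.1 p.2 ≠ 0 ↔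
          ∃ a ∈ P ++ Q, pvReach g a p)) ∧
      pvRel g (P ++ Q) (Q.foldl (pvOuterStep g) (checked, relics)).2 := by
  intro Q
  induction Q with
  | nil =>
    intro P checked relics _ _ h1 h2 h3 h4
    simp only [List.foldl_nil, List.append_nil]
    exact ⟨h1, h2, h3, h4⟩
  | cons a Q' ih =>
    intro P checked relics hQ hP h1 h2 h3 h4
    have haG : pvInG a = true := hQ a (by simp)
    simp only [List.foldl_cons]
    by_cases hzero : pvIdx2 checked a.1 a.2 = 0
    · have hnew : ¬ ∃ a' ∈ P, pvReach g a' a := by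
        intro hex
        exact ((h3 a haG).mpr hex) hzero
      have hstep : pvOuterStep g (checked, relics) a = pvBfs g a checked relics := by
        simp only [pvOuterStep]
        rw [if_pos hzero]
      obtain ⟨b1, b2, b3, b4⟩ :=
        pvBfs_spec g P a haG hP checked relics h1 h2 h3 h4 hnew
      rw [hstep]
      have := ih (P ++ [a]) (pvBfs g a checked relics).1 (pvBfs g a checked relics).2
        (fun x hx => hQ x (by simp [hx]))
        (by
          intro x hx
          rcases List.mem_append.mp hx with h | h
          · exact hP x h
          · have : x = a := by simpa using h
            subst this
            exact haG)
        b1 b2 b3 b4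
      rw [show (P ++ [a]) ++ Q' = P ++ a :: Q' by simp] at this
      exact this
    · have hold : ∃ a' ∈ P, pvReach g a' a := (h3 a haG).mp hzero
      have hstep : pvOuterStep g (checked, relics) a = (checked, relics) := by
        simp only [pvOuterStep]
        rw [if_neg (by exact fun hc => hzero hc)]
      rw [hstep]
      have h3' : ∀ p : Int × Int, pvInG p = true →
          (pvIdx2 checked p.1 p.2 ≠ 0 ↔ ∃ b ∈ P ++ [a], pvReach g b p) := by
        intro p hp
        rw [h3 p hp, pvExists_extend g P hold haG p]
      have h4' : pvRel g (P ++ [a]) relics := by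
        intro p hp
        rw [show ((∃ b ∈ P ++ [a], pvReach g b p) ∧ 3 ≤ (pvComponent g p.1 p.2).length) ↔
            ((∃ b ∈ P, pvReach g b p) ∧ 3 ≤ (pvComponent g p.1 p.2).length) by
          rw [pvExists_extend g P hold haG p]]
        exact h4 p hp
      have := ih (P ++ [a]) checked relics
        (fun x hx => hQ x (by simp [hx]))
        (by
          intro x hx
          rcases List.mem_append.mp hx with h | h
          · exact hP x h
          · have : x = a := by simpa using h
            subst this
            exact haG)
        h1 h2 h3' h4'
      rw [show (P ++ [a]) ++ Q' = P ++ a :: Q' by simp] at this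
      exact this

def pvAllP : List (Int × Int) :=
  (PySem.List.pyRange 0 5 1).flatMap (fun i =>
    (PySem.List.pyRange 0 5 1).map (fun j => (i, j)))

lemma pvNested_gen (g : List (List Int)) :
    ∀ (l1 : List Int) (st0 : List (List Int) × List (List Int)),
      l1.foldl (fun st i =>
        (PySem.List.pyRange 0 5 1).foldl (fun st j => pvOuterStep g st (i, j)) st) st0 =
      (l1.flatMap (fun i =>
        (PySem.List.pyRange 0 5 1).map (fun j => (i, j)))).foldl (pvOuterStep g) st0 := by
  intro l1
  induction l1 with
  | nil => intro st0; rfl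
  | cons a l ih =>
    intro st0
    simp only [List.foldl_cons, List.flatMap_cons, List.foldl_append, List.foldl_map]
    exact ih _

lemma mem_pvAllP (p : Int × Int) : p ∈ pvAllP ↔ pvInG p = true := by
  rcases p with ⟨x, y⟩
  simp only [pvAllP, List.mem_flatMap, List.mem_map, PySem.List.mem_pyRange_one,
    Prod.ext_iff, pvInG_iff]
  constructor
  · rintro ⟨i, ⟨hi1, hi2⟩, j, ⟨hj1, hj2⟩, rfl, rfl⟩
    exact ⟨hi1, hi2, hj1, hj2⟩
  · rintro ⟨h1, h2, h3, h4⟩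
    exact ⟨x, ⟨h1, h2⟩, y, ⟨h3, h4⟩, rfl, rfl⟩

lemma pvMat5_ext {m m' : List (List Int)} (hm : pvMat5 m) (hm' : pvMat5 m')
    (h : ∀ i j : Nat, i < 5 → j < 5 → pvIdx2 m (i : Int) (j : Int) = pvIdx2 m' (i : Int) (j : Int)) :
    m = m' := by
  obtain ⟨hl, hr⟩ := hm
  obtain ⟨hl', hr'⟩ := hm'
  apply List.ext_getElem (by omega)
  intro i h1 h2
  have hrow : m[i].length = 5 := hr _ (List.getElem_mem _)
  have hrow' : m'[i].length = 5 := hr' _ (List.getElem_mem _)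
  apply List.ext_getElem (by omega)
  intro j h3 h4
  have hij := h i j (by omega) (by omega)
  have hout : PySem.List.pyGetD m (i : Int) [] = m[i] := by
    rw [PySem.List.pyGetD_eq_getElem _ _ (by omega) (by push_cast; omega)]
    simp
  have hout' : PySem.List.pyGetD m' (i : Int) [] = m'[i]'(by omega) := by
    rw [PySem.List.pyGetD_eq_getElem _ _ (by omega) (by push_cast; omega)]
    simp
  rw [pvIdx2, pvIdx2, hout, hout',
    PySem.List.pyGetD_eq_getElem _ _ (by omega) (by push_cast; omega),
    PySem.List.pyGetD_eq_getElem _ _ (by omega) (by push_cast; omega)] at hij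
  simpa using hij

lemma pvRange5 : PySem.List.pyRange 0 5 1 = [0, 1, 2, 3, 4] := rfl

lemma pvLit5 (i : Nat) (hi : i < 5) :
    (([0, 1, 2, 3, 4] : List Int))[i]'(by simpa using hi) = (i : Int) := by
  interval_cases i <;> rfl

lemma pvBig_mat5 (g : List (List Int)) :
    pvMat5 ((PySem.List.pyRange 0 5 1).map (fun i =>
      (PySem.List.pyRange 0 5 1).map (fun j => pvCell g i j))) := by
  constructor
  · rfl
  · intro r hr
    rw [pvRange5] at hr
    simp only [List.mem_map] at hr
    obtain ⟨i, _, rfl⟩ := hr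
    rfl

lemma pvGetD_map {α β : Type} (f : α → β) (l : List α) (n : Nat) (d : β) (h : n < l.length) :
    (l.map f).getD n d = f (l[n]'h) := by
  rw [List.getD_eq_getElem _ _ (by simpa using h), List.getElem_map]

set_option maxHeartbeats 1000000 in
lemma pvBig_entry (g : List (List Int)) (i j : Nat) (hi : i < 5) (hj : j < 5) :
    pvIdx2 ((PySem.List.pyRange 0 5 1).map (fun i =>
      (PySem.List.pyRange 0 5 1).map (fun j => pvCell g i j))) (i : Int) (j : Int) =
      pvCell g (i : Int) (j : Int) := by
  rw [pvRange5, pvIdx2, PySem.List.pyGetD_natCast, PySem.List.pyGetD_natCast,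
    pvGetD_map _ _ i [] (by simp; omega), pvLit5 i hi,
    pvGetD_map _ _ j 0 (by simp; omega), pvLit5 j hj]

-- ===== VERDICT (by name: the statement is the Claim_ definition above) =====
theorem get_relics_spec : Claim_equal_get_relics := by
  intro graph _ _
  unfold Spec_get_relics
  -- unfold both ports to their folds
  rw [get_relics, get_relics_alt, pvNested_gen graph]
  set c0 : List (List Int) := List.replicate 5 (List.replicate 5 0) with hc0
  have hini_chk : ∀ p : Int × Int, pvInG p = true →
      (pvIdx2 c0 p.1 p.2 ≠ 0 ↔ ∃ a ∈ ([] : List (Int × Int)), pvReach graph a p) := by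
    intro p _
    constructor
    · intro h
      exact absurd (pvIdx2_replicate p.1 p.2) h
    · rintro ⟨a, ha, _⟩
      exact absurd ha (List.not_mem_nil)
  have hini_rel : pvRel graph [] c0 := by
    intro p _
    refine ⟨?_, fun _ => pvIdx2_replicate p.1 p.2⟩
    rintro ⟨⟨a, ha, _⟩, _⟩
    exact absurd ha (List.not_mem_nil)
  obtain ⟨b1, b2, b3, b4⟩ := pvOuter_spec graph pvAllP []
    c0 c0 (fun a ha => (mem_pvAllP a).mp ha) (fun a ha => absurd ha (List.not_mem_nil))
    pvMat5_replicate pvMat5_replicate hini_chk hini_rel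
  rw [List.nil_append] at b3 b4
  rw [show ((PySem.List.pyRange 0 5 1).flatMap (fun i =>
    (PySem.List.pyRange 0 5 1).map (fun j => (i, j)))) = pvAllP from rfl]
  set R := (pvAllP.foldl (pvOuterStep graph) (c0, c0)).2 with hR
  have hRent : ∀ i j : Nat, i < 5 → j < 5 →
      pvIdx2 R (i : Int) (j : Int) = pvCell graph (i : Int) (j : Int) := by
    intro i j hi hj
    set p : Int × Int := ((i : Int), (j : Int)) with hp
    have hpg : pvInG p = true := by
      rw [hp, pvInG_iff]
      refine ⟨?_, ?_, ?_, ?_⟩ <;> simp <;> omega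
    have hcover : ∃ a ∈ pvAllP, pvReach graph a p :=
      ⟨p, (mem_pvAllP p).mpr hpg, pvReach.base⟩
    by_cases hlen : 3 ≤ (pvComponent graph p.1 p.2).length
    · rw [pvCell, if_pos hlen]
      exact (b4 p hpg).1 ⟨hcover, hlen⟩
    · rw [pvCell, if_neg hlen]
      exact (b4 p hpg).2 (fun hc => hlen hc.2)
  have hRB : R = (PySem.List.pyRange 0 5 1).map (fun i =>
      (PySem.List.pyRange 0 5 1).map (fun j => pvCell graph i j)) := by
    refine pvMat5_ext b2 (pvBig_mat5 graph) ?_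
    intro i j hi hj
    rw [hRent i j hi hj, pvBig_entry graph i j hi hj]
  rw [hRB]
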